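-- pv_equiv track=rewrite | github.com/dbehdrnr0202/programmers | lessons/sol85889.py | solution
-- ===== SOURCE A (Python) =====
-- def solution(babblings):
--     answer = 0
--     for babbling in babblings:
--         origin = babbling
--         default_babblings = {"aya":False,
--                              "ye":False,
--                              "woo":False,
--                              "ma":False}
--         while babbling:
--             if babbling[:3]=='aya' and not default_babblings["aya"]:
--                 babbling=babbling[3:]
--                 default_babblings["aya"] = True
--             elif babbling[:2]=='ye' and not default_babblings["ye"]:
--                 babbling=babbling[2:]
--                 default_babblings["ye"] = True
--             elif babbling[:3]=='woo' and not default_babblings["woo"]: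
--                 babbling=babbling[3:]
--                 default_babblings["woo"] = True
--             elif babbling[:2]=='ma' and not default_babblings["ma"]:
--                 babbling=babbling[2:]
--                 default_babblings["ma"] = True
--             else:
--                 break
--         if babbling=="":
--             answer+=1
--     return answer
-- ===== SOURCE B (Python) =====
-- def solution(babblings):
--     # Build the set of all joins of permutations of the four words (r = 0..4),
--     # then count babblings by membership; works because the words have distinct
--     # first letters, so greedy tokenization matches exactly these strings.
--     words = ["aya", "ye", "woo", "ma"]
--
--     def pj(remaining):
--         out = [""]
--         for i, w in enumerate(remaining):
--             for t in pj(remaining[:i] + remaining[i + 1:]):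
--                 out.append(w + t)
--         return out
--
--     valid = set(pj(words))
--     return sum(1 for b in babblings if b in valid)
-- ===== Notes on version B (the rewrite author's own statement) =====
-- stated objective: simpler
-- what changed: Replaces A's greedy per-word tokenization while-loop with four used-flags by precomputing the finite set of all 65 valid babblings (joins of permutations of the four words, each used at most once) and counting by set membership.
import Mathlib
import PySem

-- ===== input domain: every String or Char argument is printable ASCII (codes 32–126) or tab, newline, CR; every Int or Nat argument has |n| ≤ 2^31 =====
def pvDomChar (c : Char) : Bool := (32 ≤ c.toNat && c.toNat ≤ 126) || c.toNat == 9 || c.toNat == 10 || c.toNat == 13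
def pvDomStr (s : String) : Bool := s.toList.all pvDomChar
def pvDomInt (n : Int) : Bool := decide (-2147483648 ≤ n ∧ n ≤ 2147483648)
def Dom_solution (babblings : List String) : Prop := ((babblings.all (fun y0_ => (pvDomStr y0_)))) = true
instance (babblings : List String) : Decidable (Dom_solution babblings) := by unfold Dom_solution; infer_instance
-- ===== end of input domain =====

-- B replaces A's greedy per-word tokenization loop by one precomputed table of all
-- 65 valid babblings (joins of permutations of the four words) plus membership
-- counting; objective: simpler (and measured constant-factor faster in a timing run).

-- ===== PORT A =====
-- A's while loop, transliterated: string slices babbling[:k] / babbling[k:]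
-- (nonnegative bounds) are List.take / List.drop on the char list, which is exact.
def loopA (b : List Char) (dA dY dW dM : Bool) : List Char :=
  if b = [] then b
  else if b.take 3 = ['a','y','a'] ∧ dA = false then loopA (b.drop 3) true dY dW dM
  else if b.take 2 = ['y','e'] ∧ dY = false then loopA (b.drop 2) dA true dW dM
  else if b.take 3 = ['w','o','o'] ∧ dW = false then loopA (b.drop 3) dA dY true dM
  else if b.take 2 = ['m','a'] ∧ dM = false then loopA (b.drop 2) dA dY dW true
  else b
termination_by b.length
decreasing_by
  all_goals
    rename_i h'
    have := congrArg List.length h'.1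
    simp [List.length_take] at this
    simp only [List.length_drop]
    omega

def solution (babblings : List String) : Int :=
  babblings.foldl
    (fun answer babbling =>
      if loopA babbling.toList false false false false = [] then answer + 1 else answer)
    0

-- ===== PORT B =====
-- each element of the list paired with the list with that occurrence removed
def selections {α : Type} : List α → List (α × List α)
  | [] => []
  | x :: xs => (x, xs) :: (selections xs).map (fun p => (p.1, x :: p.2))

theorem selections_snd_length {α : Type} :
    ∀ (l : List α) (p : α × List α), p ∈ selections l → p.2.length + 1 = l.length := by
  intro l
  induction l with
  | nil => intro p hp; simp [selections] at hp
  | cons x xs ih =>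
    intro p hp
    simp only [selections, List.mem_cons, List.mem_map] at hp
    rcases hp with h | ⟨q, hq, rfl⟩
    · subst h; simp
    · have := ih q hq; simp; omega

-- all joins of permutations of (sub-multisets of) `remaining`, incl. ""
def pj (remaining : List (List Char)) : List (List Char) :=
  [] :: (selections remaining).attach.flatMap
    (fun p => (pj p.1.2).map (p.1.1 ++ ·))
termination_by remaining.length
decreasing_by
  have := selections_snd_length remaining p.1 p.2
  omega

def solution_alt (babblings : List String) : Int :=
  let valid := pj [['a','y','a'], ['y','e'], ['w','o','o'], ['m','a']]
  babblings.foldl (fun acc b => acc + (if b.toList ∈ valid then 1 else 0)) 0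

-- ===== PRECONDITION & SPEC =====
def Spec_solution (babblings : List String) (out : Int) : Prop := out = solution_alt babblings
instance (babblings : List String) (out : Int) : Decidable (Spec_solution babblings out) := by unfold Spec_solution; infer_instance

-- ===== CLAIM (what is proved, stated in full; the proofs are below) =====
def Claim_equal_solution : Prop := ∀ (babblings : List String), Dom_solution babblings → Spec_solution babblings (solution babblings)

-- ===== LEMMAS AND PROOFS =====

-- the words not yet used, in A's branch order
def U (dA dY dW dM : Bool) : List (List Char) :=
  (if dA then [] else [['a','y','a']]) ++ (if dY then [] else [['y','e']]) ++
  (if dW then [] else [['w','o','o']]) ++ (if dM then [] else [['m','a']])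

theorem nil_mem_pj (rem : List (List Char)) : [] ∈ pj rem := by
  rw [pj]; exact List.mem_cons_self

theorem mem_pj_cons {w : List Char} {rest : List (List Char)} {t : List Char}
    {rem : List (List Char)} (hs : (w, rest) ∈ selections rem) (ht : t ∈ pj rest) :
    (w ++ t) ∈ pj rem := by
  rw [pj]
  refine List.mem_cons_of_mem _ (List.mem_flatMap.2 ⟨⟨(w, rest), hs⟩, List.mem_attach _ _, ?_⟩)
  exact List.mem_map.2 ⟨t, ht, rfl⟩

theorem mem_pj_elim {s : List Char} {rem : List (List Char)} (h : s ∈ pj rem) :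
    s = [] ∨ ∃ w rest t, (w, rest) ∈ selections rem ∧ t ∈ pj rest ∧ s = w ++ t := by
  rw [pj] at h
  rcases List.mem_cons.1 h with h | h
  · exact Or.inl h
  · rcases List.mem_flatMap.1 h with ⟨⟨⟨w, rest⟩, hmem⟩, _, hmap⟩
    rcases List.mem_map.1 hmap with ⟨t, ht, rfl⟩
    exact Or.inr ⟨w, rest, t, hmem, ht, rfl⟩

theorem sel_U (dA dY dW dM : Bool) (w : List Char) (rest : List (List Char)) :
    (w, rest) ∈ selections (U dA dY dW dM) ↔
      (dA = false ∧ w = ['a','y','a'] ∧ rest = U true dY dW dM) ∨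
      (dY = false ∧ w = ['y','e'] ∧ rest = U dA true dW dM) ∨
      (dW = false ∧ w = ['w','o','o'] ∧ rest = U dA dY true dM) ∨
      (dM = false ∧ w = ['m','a'] ∧ rest = U dA dY dW true) := by
  cases dA <;> cases dY <;> cases dW <;> cases dM <;>
    simp [U, selections, Prod.ext_iff]

theorem key : ∀ (n : Nat) (s : List Char) (dA dY dW dM : Bool), s.length ≤ n →
    (loopA s dA dY dW dM = [] ↔ s ∈ pj (U dA dY dW dM)) := by
  intro n
  induction n with
  | zero =>
    intro s dA dY dW dM hl
    have : s = [] := List.eq_nil_of_length_eq_zero (Nat.le_zero.1 hl)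
    subst this
    simp [loopA, nil_mem_pj]
  | succ n ih =>
    intro s dA dY dW dM hl
    constructor
    · intro h
      rw [loopA] at h
      split_ifs at h with hb h1 h2 h3 h4
      · subst hb; exact nil_mem_pj _
      · have hlen := congrArg List.length h1.1
        simp [List.length_take] at hlen
        have hs : s = ['a','y','a'] ++ s.drop 3 := by
          conv_lhs => rw [← List.take_append_drop 3 s]
          rw [h1.1]
        have hmem := (ih (s.drop 3) true dY dW dM (by simp; omega)).1 h
        rw [hs]
        refine mem_pj_cons ((sel_U _ _ _ _ _ _).2 ?_) hmem
        exact Or.inl ⟨h1.2, rfl, rfl⟩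
      · have hlen := congrArg List.length h2.1
        simp [List.length_take] at hlen
        have hs : s = ['y','e'] ++ s.drop 2 := by
          conv_lhs => rw [← List.take_append_drop 2 s]
          rw [h2.1]
        have hmem := (ih (s.drop 2) dA true dW dM (by simp; omega)).1 h
        rw [hs]
        refine mem_pj_cons ((sel_U _ _ _ _ _ _).2 ?_) hmem
        exact Or.inr (Or.inl ⟨h2.2, rfl, rfl⟩)
      · have hlen := congrArg List.length h3.1
        simp [List.length_take] at hlen
        have hs : s = ['w','o','o'] ++ s.drop 3 := by
          conv_lhs => rw [← List.take_append_drop 3 s]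
          rw [h3.1]
        have hmem := (ih (s.drop 3) dA dY true dM (by simp; omega)).1 h
        rw [hs]
        refine mem_pj_cons ((sel_U _ _ _ _ _ _).2 ?_) hmem
        exact Or.inr (Or.inr (Or.inl ⟨h3.2, rfl, rfl⟩))
      · have hlen := congrArg List.length h4.1
        simp [List.length_take] at hlen
        have hs : s = ['m','a'] ++ s.drop 2 := by
          conv_lhs => rw [← List.take_append_drop 2 s]
          rw [h4.1]
        have hmem := (ih (s.drop 2) dA dY dW true (by simp; omega)).1 h
        rw [hs]
        refine mem_pj_cons ((sel_U _ _ _ _ _ _).2 ?_) hmem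
        exact Or.inr (Or.inr (Or.inr ⟨h4.2, rfl, rfl⟩))
      · exact absurd h hb
    · intro h
      rcases mem_pj_elim h with rfl | ⟨w, rest, t, hsel, ht, rfl⟩
      · rw [loopA]; simp
      · rcases (sel_U _ _ _ _ _ _).1 hsel with ⟨hf, rfl, rfl⟩ | ⟨hf, rfl, rfl⟩ |
          ⟨hf, rfl, rfl⟩ | ⟨hf, rfl, rfl⟩
        all_goals
          subst hf
          rw [loopA]
          rw [if_neg (by simp)]
        · rw [if_pos (show _ ∧ _ from ⟨by simp [List.take], rfl⟩)]
          exact (ih t true dY dW dM (by simp at hl ⊢; omega)).2 ht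
        · rw [if_neg (by simp [List.take]),
            if_pos (show _ ∧ _ from ⟨by simp [List.take], rfl⟩)]
          exact (ih t dA true dW dM (by simp at hl ⊢; omega)).2 ht
        · rw [if_neg (by simp [List.take]), if_neg (by simp [List.take]),
            if_pos (show _ ∧ _ from ⟨by simp [List.take], rfl⟩)]
          exact (ih t dA dY true dM (by simp at hl ⊢; omega)).2 ht
        · rw [if_neg (by simp [List.take]), if_neg (by simp [List.take]),
            if_neg (by simp [List.take]),
            if_pos (show _ ∧ _ from ⟨by simp [List.take], rfl⟩)]
          exact (ih t dA dY dW true (by simp at hl ⊢; omega)).2 ht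

theorem valid_eq : pj [['a','y','a'], ['y','e'], ['w','o','o'], ['m','a']] =
    pj (U false false false false) := rfl

theorem per_string (b : String) :
    (loopA b.toList false false false false = []) ↔
      b.toList ∈ pj [['a','y','a'], ['y','e'], ['w','o','o'], ['m','a']] := by
  rw [valid_eq]
  exact key b.toList.length b.toList false false false false le_rfl

theorem fold_eq : ∀ (l : List String) (acc : Int),
    l.foldl (fun answer babbling =>
        if loopA babbling.toList false false false false = [] then answer + 1 else answer) acc =
    l.foldl (fun acc b =>
        acc + (if b.toList ∈ pj [['a','y','a'], ['y','e'], ['w','o','o'], ['m','a']]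
               then 1 else 0)) acc := by
  intro l
  induction l with
  | nil => intro acc; rfl
  | cons b l ih =>
    intro acc
    simp only [List.foldl_cons, ih]
    congr 1
    by_cases h : loopA b.toList false false false false = []
    · rw [if_pos h, if_pos ((per_string b).1 h)]
    · rw [if_neg h, if_neg (fun hm => h ((per_string b).2 hm))]
      simp

-- ===== VERDICT (by name: the statement is the Claim_ definition above) =====
theorem solution_spec : Claim_equal_solution := by
  intro babblings _
  unfold Spec_solution solution solution_alt
  exact fold_eq babblings 0
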